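-- pv_equiv track=rewrite | github.com/jorgemf/kaggle_redefining_cancer_treatment | src/preprocess_data.py | is_mutation
-- ===== SOURCE A (Python) =====
-- def is_mutation(word, genes):
--     """
--     Checks whether a word is a mutation or not. This method assumes a mutation is not a gene and at
--     least one of the next conditions:
--     - has a _ character
--     - has digits and 2 or more upper case letters
--     - has 3 digits and at least 1 upper case letter
--     - has at least 1 digits, at least 1 upper case letters and at least 1 symbols
--     - has at least 1 digits and at least 1 lower case letter
--     - has a _ character and 2 or more upper case letters
--     - has lower case letters and 2 or more upper case leters
--     :param str word: The word to check
--     :param List[str] genes: The list of genes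
--     :return bool: True if the word is mutation False otherwise
--     """
--     word = word.strip()
--     if len(word) >= 3 and word not in genes:
--         has_hyphen_minus = '_' in word
--         has_hyphen = '-' in word
--         has_digits = any(ch.isdigit() for ch in word)
--         has_three_digits = sum(1 for ch in word if ch.isdigit()) > 2
--         has_upper_case = any(ch.isupper() for ch in word)
--         has_two_upper_case = sum(1 for ch in word if ch.isupper()) > 1
--         has_lower_case = any(ch.islower() for ch in word)
--         has_symbols = any(not ch.isalnum() for ch in word)
--         return has_hyphen_minus or \
--                (has_digits and has_two_upper_case) or \
--                (has_three_digits and has_upper_case) or \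
--                (has_digits and has_upper_case and has_symbols) or \
--                (has_digits and has_lower_case) or \
--                (has_hyphen and has_two_upper_case) or \
--                (has_lower_case and has_two_upper_case)
--     return False
-- ===== SOURCE B (Python) =====
-- def is_mutation(word, genes):
--     word = word.strip()
--     if len(word) < 3 or word in genes:
--         return False
--     n_digits = n_upper = n_lower = n_sym = 0
--     has_underscore = has_hyphen = False
--     for ch in word:
--         if ch == '_':
--             has_underscore = True
--         if ch == '-':
--             has_hyphen = True
--         if ch.isdigit():
--             n_digits += 1
--         if ch.isupper():
--             n_upper += 1
--         if ch.islower():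
--             n_lower += 1
--         if not ch.isalnum():
--             n_sym += 1
--     has_digits = n_digits >= 1
--     has_three_digits = n_digits > 2
--     has_upper_case = n_upper >= 1
--     has_two_upper_case = n_upper > 1
--     has_lower_case = n_lower >= 1
--     has_symbols = n_sym >= 1
--     return has_underscore or \
--            (has_digits and has_two_upper_case) or \
--            (has_three_digits and has_upper_case) or \
--            (has_digits and has_upper_case and has_symbols) or \
--            (has_digits and has_lower_case) or \
--            (has_hyphen and has_two_upper_case) or \
--            (has_lower_case and has_two_upper_case)
-- ===== Notes on version B (the rewrite author's own statement) =====
-- stated objective: simpler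
-- what changed: Collapses A's eight separate scans of the word (two substring tests, four any-generators, two counting sums) into one pass that maintains four counters and two flags, deriving all seven predicates from them.
import Mathlib
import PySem

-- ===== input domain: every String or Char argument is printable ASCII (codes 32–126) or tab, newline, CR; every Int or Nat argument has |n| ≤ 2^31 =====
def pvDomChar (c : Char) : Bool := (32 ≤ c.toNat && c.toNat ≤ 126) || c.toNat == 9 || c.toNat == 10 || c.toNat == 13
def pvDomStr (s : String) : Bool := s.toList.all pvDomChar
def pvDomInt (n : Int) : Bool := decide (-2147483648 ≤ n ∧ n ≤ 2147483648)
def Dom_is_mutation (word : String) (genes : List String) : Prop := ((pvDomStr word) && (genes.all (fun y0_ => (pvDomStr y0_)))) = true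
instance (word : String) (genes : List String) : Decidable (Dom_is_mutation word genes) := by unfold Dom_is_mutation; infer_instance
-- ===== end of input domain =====

-- B replaces A's eight separate scans of the word with a single pass maintaining counters/flags; same result, proved equal.

-- ===== PORT A =====
def is_mutation (word : String) (genes : List String) : Bool :=
  let w := PySem.Str.strip word
  if 3 ≤ PySem.Str.len w ∧ ¬ (w ∈ genes) then
    let cs := w.toList
    let has_hyphen_minus := PySem.Str.isIn "_" w
    let has_hyphen := PySem.Str.isIn "-" w
    let has_digits := cs.any (fun ch => PySem.Chars.isdigit ch)
    let has_three_digits := (cs.foldl (fun acc ch => if PySem.Chars.isdigit ch then acc + 1 else acc) (0 : Int)) > 2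
    let has_upper_case := cs.any (fun ch => PySem.Chars.isupper ch)
    let has_two_upper_case := (cs.foldl (fun acc ch => if PySem.Chars.isupper ch then acc + 1 else acc) (0 : Int)) > 1
    let has_lower_case := cs.any (fun ch => PySem.Chars.islower ch)
    let has_symbols := cs.any (fun ch => ! PySem.Chars.isalnum ch)
    has_hyphen_minus ||
      (has_digits && has_two_upper_case) ||
      (has_three_digits && has_upper_case) ||
      (has_digits && has_upper_case && has_symbols) ||
      (has_digits && has_lower_case) ||
      (has_hyphen && has_two_upper_case) ||
      (has_lower_case && has_two_upper_case)
  else false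

-- ===== PORT B =====
-- one pass over the characters: four counters and two flags
def is_mutation_alt_loop (cs : List Char) (st : Int × Int × Int × Int × Bool × Bool) :
    Int × Int × Int × Int × Bool × Bool :=
  cs.foldl (fun st ch =>
    let (nd, nu, nl, ns, un, hy) := st
    let un := if ch = '_' then true else un
    let hy := if ch = '-' then true else hy
    let nd := if PySem.Chars.isdigit ch then nd + 1 else nd
    let nu := if PySem.Chars.isupper ch then nu + 1 else nu
    let nl := if PySem.Chars.islower ch then nl + 1 else nl
    let ns := if ! PySem.Chars.isalnum ch then ns + 1 else ns
    (nd, nu, nl, ns, un, hy)) st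

def is_mutation_alt (word : String) (genes : List String) : Bool :=
  let w := PySem.Str.strip word
  if PySem.Str.len w < 3 ∨ w ∈ genes then false
  else
    let (nd, nu, nl, ns, un, hy) := is_mutation_alt_loop w.toList (0, 0, 0, 0, false, false)
    let has_digits := nd ≥ 1
    let has_three_digits := nd > 2
    let has_upper_case := nu ≥ 1
    let has_two_upper_case := nu > 1
    let has_lower_case := nl ≥ 1
    let has_symbols := ns ≥ 1
    un ||
      (has_digits && has_two_upper_case) ||
      (has_three_digits && has_upper_case) ||
      (has_digits && has_upper_case && has_symbols) ||
      (has_digits && has_lower_case) ||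
      (hy && has_two_upper_case) ||
      (has_lower_case && has_two_upper_case)

-- ===== PRECONDITION & SPEC =====
def Spec_is_mutation (word : String) (genes : List String) (out : Bool) : Prop := out = is_mutation_alt word genes
instance (word : String) (genes : List String) (out : Bool) : Decidable (Spec_is_mutation word genes out) := by unfold Spec_is_mutation; infer_instance

-- ===== CLAIM (what is proved, stated in full; the proofs are below) =====
def Claim_equal_is_mutation : Prop := ∀ (word : String) (genes : List String), Dom_is_mutation word genes → Spec_is_mutation word genes (is_mutation word genes)

-- ===== LEMMAS AND PROOFS =====

theorem loop_eq (cs : List Char) (nd nu nl ns : Int) (un hy : Bool) :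
    is_mutation_alt_loop cs (nd, nu, nl, ns, un, hy) =
      (nd + cs.countP (fun ch => PySem.Chars.isdigit ch),
       nu + cs.countP (fun ch => PySem.Chars.isupper ch),
       nl + cs.countP (fun ch => PySem.Chars.islower ch),
       ns + cs.countP (fun ch => ! PySem.Chars.isalnum ch),
       un || cs.contains '_',
       hy || cs.contains '-') := by
  induction cs generalizing nd nu nl ns un hy with
  | nil => simp [is_mutation_alt_loop]
  | cons c cs ih =>
    simp only [is_mutation_alt_loop, List.foldl_cons] at *
    rw [ih]
    simp only [List.countP_cons, List.contains_cons, Prod.mk.injEq]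
    refine ⟨?_, ?_, ?_, ?_, ?_, ?_⟩
    · by_cases h : PySem.Chars.isdigit c <;> simp [h] <;> ring
    · by_cases h : PySem.Chars.isupper c <;> simp [h] <;> ring
    · by_cases h : PySem.Chars.islower c <;> simp [h] <;> ring
    · by_cases h : PySem.Chars.isalnum c <;> simp [h] <;> ring
    · by_cases h : c = '_' <;> cases un <;> simp [h] <;> (intro h'; exact absurd h'.symm h)
    · by_cases h : c = '-' <;> cases hy <;> simp [h] <;> (intro h'; exact absurd h'.symm h)

theorem any_eq_countP_ge_one (p : Char → Bool) (cs : List Char) :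
    decide ((cs.countP p : Int) ≥ 1) = cs.any p := by
  by_cases h : ∃ a ∈ cs, p a
  · have h1 : cs.any p = true := List.any_eq_true.mpr h
    have h2 : 0 < cs.countP p := List.countP_pos_iff.mpr h
    rw [h1, decide_eq_true_iff]
    omega
  · have h1 : cs.any p = false := List.any_eq_false.mpr (by simpa using h)
    have h2 : cs.countP p = 0 := List.countP_eq_zero.mpr (by simpa using h)
    simp [h1, h2]

theorem foldl_count (p : Char → Bool) (cs : List Char) :
    cs.foldl (fun acc ch => if p ch then acc + 1 else acc) (0 : Int) = (cs.countP p : Int) := by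
  simpa using PySem.List.foldl_if_add_one p cs 0

theorem isIn_single (c : Char) (w : String) :
    PySem.Str.isIn (String.ofList [c]) w = w.toList.contains c := by
  by_cases h : c ∈ w.toList
  · have h1 : w.toList.contains c = true := by simpa [List.contains_eq_mem]
    rw [h1, PySem.Str.isIn_iff_infix]
    obtain ⟨s, t, heq⟩ := List.append_of_mem h
    rw [heq]
    exact ⟨s, t, by simp⟩
  · have h1 : w.toList.contains c = false := by simpa [List.contains_eq_mem]
    rw [h1, ← Bool.not_eq_true, PySem.Str.isIn_iff_infix]
    intro hinf
    exact h (hinf.sublist.subset (by simp))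

theorem isIn_underscore (w : String) : PySem.Str.isIn "_" w = w.toList.contains '_' :=
  isIn_single '_' w

theorem isIn_hyphen (w : String) : PySem.Str.isIn "-" w = w.toList.contains '-' :=
  isIn_single '-' w

-- ===== VERDICT (by name: the statement is the Claim_ definition above) =====
theorem is_mutation_spec : Claim_equal_is_mutation := by
  intro word genes _
  unfold Spec_is_mutation is_mutation is_mutation_alt
  by_cases hc : 3 ≤ PySem.Str.len (PySem.Str.strip word) ∧ PySem.Str.strip word ∉ genes
  · have hc' : ¬ (PySem.Str.len (PySem.Str.strip word) < 3 ∨ PySem.Str.strip word ∈ genes) := by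
      rcases hc with ⟨h1, h2⟩
      intro h
      rcases h with h | h
      · omega
      · exact h2 h
    rw [if_pos hc, if_neg hc']
    rw [loop_eq]
    simp only [zero_add, Bool.false_or, ge_iff_le, gt_iff_lt]
    rw [foldl_count, foldl_count, isIn_underscore, isIn_hyphen,
      any_eq_countP_ge_one (fun ch => PySem.Chars.isdigit ch),
      any_eq_countP_ge_one (fun ch => PySem.Chars.isupper ch),
      any_eq_countP_ge_one (fun ch => PySem.Chars.islower ch),
      any_eq_countP_ge_one (fun ch => ! PySem.Chars.isalnum ch)]
  · have hc' : PySem.Str.len (PySem.Str.strip word) < 3 ∨ PySem.Str.strip word ∈ genes := by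
      by_cases hm : PySem.Str.strip word ∈ genes
      · exact Or.inr hm
      · refine Or.inl ?_
        by_contra hlt
        exact hc ⟨by omega, hm⟩
    rw [if_neg hc, if_pos hc']
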